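-- pv_equiv track=rewrite | github.com/benayat/vllm-speculative-init | .github/scripts/bump_version.py | get_bump_level_from_label
-- ===== SOURCE A (Python) =====
-- def get_bump_level_from_label(labels):
--     """
--     Determine bump level from PR labels.
--     Returns 'major', 'minor', 'patch', or None if no relevant label found.
--     """
--     label_names = [label.get("name", "").lower() for label in labels]
--
--     if "major" in label_names:
--         return "major"
--     elif "minor" in label_names:
--         return "minor"
--     elif "patch" in label_names:
--         return "patch"
--
--     return None
-- ===== SOURCE B (Python) =====
-- def get_bump_level_from_label(labels):
--     """
--     Determine bump level from PR labels.
--     Returns 'major', 'minor', 'patch', or None if no relevant label found.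
--     Single pass: keep the minimum rank seen, then translate it back.
--     """
--     ranks = {"major": 0, "minor": 1, "patch": 2}
--     best = None
--     for label in labels:
--         r = ranks.get(label.get("name", "").lower())
--         if r is not None and (best is None or r < best):
--             best = r
--     if best is None:
--         return None
--     return ["major", "minor", "patch"][best]
-- ===== Notes on version B (the rewrite author's own statement) =====
-- stated objective: alternative
-- what changed: Replaced the three sequential membership scans over a precomputed name list with a single pass that keeps the minimum priority rank seen and translates it back at the end.
import Mathlib
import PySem

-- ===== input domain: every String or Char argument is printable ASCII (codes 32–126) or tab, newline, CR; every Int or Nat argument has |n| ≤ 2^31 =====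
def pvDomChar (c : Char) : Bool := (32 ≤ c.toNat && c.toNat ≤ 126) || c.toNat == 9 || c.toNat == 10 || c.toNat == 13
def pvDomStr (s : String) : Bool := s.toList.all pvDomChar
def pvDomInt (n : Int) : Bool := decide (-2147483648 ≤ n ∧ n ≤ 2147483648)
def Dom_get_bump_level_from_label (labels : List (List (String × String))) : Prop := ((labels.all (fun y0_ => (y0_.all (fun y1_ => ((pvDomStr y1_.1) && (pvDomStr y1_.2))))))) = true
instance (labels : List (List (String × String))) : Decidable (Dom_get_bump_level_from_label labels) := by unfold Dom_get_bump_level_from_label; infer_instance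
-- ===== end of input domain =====

-- B replaces A's three sequential membership scans with a single min-rank-accumulator pass; alternative decomposition, same cost.


-- ===== PORT A =====
def get_bump_level_from_label (labels : List (List (String × String))) : Option String :=
  let label_names := labels.map (fun label => PySem.Str.lower (PySem.Dict.getD (PySem.Dict.mk label) "name" ""))
  if label_names.contains "major" then some "major"
  else if label_names.contains "minor" then some "minor"
  else if label_names.contains "patch" then some "patch"
  else none

-- ===== PORT B =====
-- ranks.get(name): the literal 3-entry dict lookup, written as the equivalent chain
def pvRank (s : String) : Option Int :=
  if s = "major" then some 0 else if s = "minor" then some 1 else if s = "patch" then some 2 else none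

-- one iteration of B's loop: update the running minimum rank
def pvStep (best : Option Int) (label : List (String × String)) : Option Int :=
  match pvRank (PySem.Str.lower (PySem.Dict.getD (PySem.Dict.mk label) "name" "")) with
  | none => best
  | some r => match best with
              | none => some r
              | some b => if r < b then some r else some b

def get_bump_level_from_label_alt (labels : List (List (String × String))) : Option String :=
  match labels.foldl pvStep none with
  | none => none
  | some r => PySem.List.pyGet? ["major", "minor", "patch"] r

-- ===== PRECONDITION & SPEC =====
def Spec_get_bump_level_from_label (labels : List (List (String × String))) (out : Option String) : Prop := out = get_bump_level_from_label_alt labels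
instance (labels : List (List (String × String))) (out : Option String) : Decidable (Spec_get_bump_level_from_label labels out) := by unfold Spec_get_bump_level_from_label; infer_instance

-- ===== CLAIM (what is proved, stated in full; the proofs are below) =====
def Claim_equal_get_bump_level_from_label : Prop := ∀ (labels : List (List (String × String))), Dom_get_bump_level_from_label labels → Spec_get_bump_level_from_label labels (get_bump_level_from_label labels)

-- ===== LEMMAS AND PROOFS =====

-- string-level step: pvStep only looks at the lowered name
def pvStepS (best : Option Int) (s : String) : Option Int :=
  match pvRank s with
  | none => best
  | some r => match best with
              | none => some r
              | some b => if r < b then some r else some b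

-- the chain-of-memberships value of A, at rank level
def pvChainRank (ns : List String) : Option Int :=
  if ns.contains "major" then some 0
  else if ns.contains "minor" then some 1
  else if ns.contains "patch" then some 2
  else none

def optMin (a b : Option Int) : Option Int :=
  match a, b with
  | none, b => b
  | a, none => a
  | some x, some y => some (min x y)

lemma pvStepS_eq_optMin (best : Option Int) (s : String) :
    pvStepS best s = optMin best (pvRank s) := by
  unfold pvStepS optMin pvRank
  split_ifs <;> cases best <;> (try rfl) <;>
    (simp only [min_def]; split_ifs <;> simp_all <;> omega)

lemma optMin_assoc (a b c : Option Int) : optMin (optMin a b) c = optMin a (optMin b c) := by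
  cases a <;> cases b <;> cases c <;> simp [optMin, min_assoc]

lemma foldl_stepS_acc (ns : List String) (a : Option Int) :
    ns.foldl pvStepS a = optMin a (ns.foldl pvStepS none) := by
  induction ns generalizing a with
  | nil => cases a <;> rfl
  | cons s ns ih =>
    simp only [List.foldl_cons, pvStepS_eq_optMin]
    rw [ih (optMin a (pvRank s)), ih (optMin none (pvRank s)), optMin_assoc]
    rfl

lemma foldl_stepS_eq_chainRank (ns : List String) :
    ns.foldl pvStepS none = pvChainRank ns := by
  induction ns with
  | nil => rfl
  | cons s ns ih =>
    simp only [List.foldl_cons, pvStepS_eq_optMin]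
    rw [foldl_stepS_acc, ih]
    show optMin (optMin none (pvRank s)) (pvChainRank ns) = pvChainRank (s :: ns)
    simp only [pvChainRank, List.contains_cons, beq_iff_eq, Bool.or_eq_true]
    by_cases h0 : "major" = s
    · subst h0
      simp [pvRank]
      split_ifs <;> decide
    · by_cases h1 : "minor" = s
      · subst h1
        simp [pvRank, h0]
        split_ifs <;> decide
      · by_cases h2 : "patch" = s
        · subst h2
          simp [pvRank, h0, h1]
          split_ifs <;> decide
        · have h0' : ¬ s = "major" := fun h => h0 h.symm
          have h1' : ¬ s = "minor" := fun h => h1 h.symm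
          have h2' : ¬ s = "patch" := fun h => h2 h.symm
          simp [pvRank, h0, h1, h2, h0', h1', h2']
          split_ifs <;> rfl

-- translate pvChainRank back to A's chain of strings
lemma chain_translate (ns : List String) :
    (if ns.contains "major" then some "major"
     else if ns.contains "minor" then some "minor"
     else if ns.contains "patch" then some "patch"
     else none)
    = match pvChainRank ns with
      | none => none
      | some r => PySem.List.pyGet? ["major", "minor", "patch"] r := by
  unfold pvChainRank
  split_ifs <;> simp [PySem.List.pyGet?, PySem.List.pyIdx?]

-- ===== VERDICT (by name: the statement is the Claim_ definition above) =====
theorem get_bump_level_from_label_spec : Claim_equal_get_bump_level_from_label := by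
  intro labels _
  unfold Spec_get_bump_level_from_label get_bump_level_from_label get_bump_level_from_label_alt
  have hmap : labels.foldl pvStep none
      = (labels.map (fun label => PySem.Str.lower (PySem.Dict.getD (PySem.Dict.mk label) "name" ""))).foldl pvStepS none := by
    rw [List.foldl_map]
    rfl
  rw [hmap, foldl_stepS_eq_chainRank]
  exact chain_translate _
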